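-- pv_equiv track=rewrite | github.com/pangqianqian/secret | Cal_fea.py | caculate_line
-- ===== SOURCE A (Python) =====
-- def caculate_line(line):
--     # 计算该行或者列的特征值
--     size = len(line)
--     limit = 0  # 有无的界限
--     k = 0  # 该行的特征值
--     tag = 1
--     for i in range(size):
--         if line[i] == limit and tag == 1:
--             k += 1
--             tag = 0
--         elif line[i] > limit:
--             tag = 1
--     return k
-- ===== SOURCE B (Python) =====
-- def caculate_line(line):
--     # Staged passes: negatives are transparent, so keep only x >= 0 as a
--     # zero/positive boolean stream, collapse it into one key per maximal run
--     # (a groupby), and count the runs of zeros.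
--     ks = [x == 0 for x in line if x >= 0]
--     keys = []
--     i = 0
--     n = len(ks)
--     while i < n:
--         keys.append(ks[i])
--         j = i
--         while j < n and ks[j] == ks[i]:
--             j += 1
--         i = j
--     return sum(keys)
-- ===== Notes on version B (the rewrite author's own statement) =====
-- stated objective: alternative
-- what changed: Replaces the tag-toggle state machine with staged passes: filter non-negative elements to a zero/positive boolean stream, collapse each maximal run to its key (a groupby), and count the zero-run keys.
import Mathlib
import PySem

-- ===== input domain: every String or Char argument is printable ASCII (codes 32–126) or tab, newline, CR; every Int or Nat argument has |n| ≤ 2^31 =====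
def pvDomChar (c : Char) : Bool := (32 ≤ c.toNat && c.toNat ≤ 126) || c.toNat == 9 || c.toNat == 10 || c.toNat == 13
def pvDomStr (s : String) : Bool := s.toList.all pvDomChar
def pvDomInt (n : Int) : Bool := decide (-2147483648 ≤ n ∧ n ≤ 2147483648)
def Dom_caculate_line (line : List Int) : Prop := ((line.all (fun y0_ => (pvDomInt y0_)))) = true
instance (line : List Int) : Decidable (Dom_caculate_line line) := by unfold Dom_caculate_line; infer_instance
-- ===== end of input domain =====

-- B replaces A's tag-toggle state machine by staged passes: filter non-negatives,
-- collapse maximal runs to one key each (groupby), count the zero-runs (alternative, same cost).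

-- ===== PORT A =====
-- for-loop over the elements with state (k, tag), branches in A's order
def caculate_line (line : List Int) : Int :=
  (line.foldl
    (fun (s : Int × Int) x =>
      if x = 0 ∧ s.2 = 1 then (s.1 + 1, 0)
      else if x > 0 then (s.1, 1)
      else s)
    (0, 1)).1

-- ===== PORT B =====
-- Source B's run-collapsing pass: emit the key of each maximal run, then skip the run
def pvGroupKeys : List Bool → List Bool
  | [] => []
  | b :: bs => b :: pvGroupKeys (bs.dropWhile (· == b))
  termination_by bs => bs.length
  decreasing_by
    exact Nat.lt_succ_of_le (List.length_dropWhile_le _ _)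

def caculate_line_alt (line : List Int) : Int :=
  let ks := (line.filter (fun x => 0 ≤ x)).map (fun x => x == 0)
  ((pvGroupKeys ks).map (fun b => if b then (1 : Int) else 0)).sum

-- ===== PRECONDITION & SPEC =====
def Spec_caculate_line (line : List Int) (out : Int) : Prop := out = caculate_line_alt line
instance (line : List Int) (out : Int) : Decidable (Spec_caculate_line line out) := by unfold Spec_caculate_line; infer_instance

-- ===== CLAIM (what is proved, stated in full; the proofs are below) =====
def Claim_equal_caculate_line : Prop := ∀ (line : List Int), Dom_caculate_line line → Spec_caculate_line line (caculate_line line)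

-- ===== LEMMAS AND PROOFS =====

-- number of run starts of `true` in `bs`, given the previous element `prev`
def pvZ (prev : Bool) : List Bool → Int
  | [] => 0
  | b :: bs => (if b && !prev then 1 else 0) + pvZ b bs

theorem pvFold_eq (line : List Int) : ∀ (k tag : Int), tag = 0 ∨ tag = 1 →
    (line.foldl
      (fun (s : Int × Int) x =>
        if x = 0 ∧ s.2 = 1 then (s.1 + 1, 0)
        else if x > 0 then (s.1, 1)
        else s)
      (k, tag)).1
    = k + pvZ (tag == 0) ((line.filter (fun x => 0 ≤ x)).map (fun x => x == 0)) := by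
  induction line with
  | nil => intro k tag _; simp [pvZ]
  | cons x xs ih =>
    intro k tag htag
    by_cases hx0 : x = 0
    · subst hx0
      rcases htag with h | h <;> subst h
      · simp only [List.foldl_cons]
        norm_num
        rw [ih k 0 (Or.inl rfl)]
        simp [pvZ]
      · simp only [List.foldl_cons]
        norm_num
        rw [ih (k+1) 0 (Or.inl rfl)]
        simp [pvZ]
        ring
    · by_cases hxpos : 0 < x
      · simp only [List.foldl_cons]
        rw [show (if x = 0 ∧ tag = 1 then (k+1,(0:Int)) else if x > 0 then (k,1) else (k,tag)) = (k,1) by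
          simp [hx0, hxpos]]
        rw [ih k 1 (Or.inr rfl)]
        have hkeep : (0:Int) ≤ x := le_of_lt hxpos
        have hb : (x == (0:Int)) = false := by simp [hx0]
        simp [pvZ, hkeep, hb]
      · have hneg : ¬ (0:Int) ≤ x := by omega
        simp only [List.foldl_cons]
        rw [show (if x = 0 ∧ tag = 1 then (k+1,(0:Int)) else if x > 0 then (k,1) else (k,tag)) = (k,tag) by
          simp [hx0, hxpos]]
        rw [ih k tag htag]
        simp [hneg]

-- dropping the rest of a run does not change the run-start count
theorem pvZ_dropWhile (b : Bool) (bs : List Bool) :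
    pvZ b (bs.dropWhile (· == b)) = pvZ b bs := by
  induction bs with
  | nil => rfl
  | cons h t ih =>
    by_cases hb : h = b
    · subst hb
      simpa [List.dropWhile_cons, pvZ] using ih
    · simp [hb]

-- when the head differs from prev, the count is the same as starting from `false`
theorem pvZ_head_ne (b : Bool) (bs : List Bool) (h : bs.head? ≠ some b) :
    pvZ b bs = pvZ false bs := by
  cases bs with
  | nil => rfl
  | cons x t =>
    cases b <;> cases x <;> simp_all [pvZ]

-- dropWhile's head never equals the dropped key
theorem pvDrop_head (b : Bool) (bs : List Bool) :
    (bs.dropWhile (· == b)).head? ≠ some b := by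
  induction bs with
  | nil => simp
  | cons h t ih =>
    by_cases hb : h = b
    · subst hb; simpa [List.dropWhile_cons] using ih
    · simp [hb]

-- the group-keys count equals the run-start count from prev = false
theorem pvGroup_eq (n : ℕ) : ∀ (bs : List Bool), bs.length ≤ n →
    ((pvGroupKeys bs).map (fun b => if b then (1 : Int) else 0)).sum = pvZ false bs := by
  induction n with
  | zero =>
    intro bs h
    have : bs = [] := List.eq_nil_of_length_eq_zero (Nat.le_zero.mp h)
    subst this; simp [pvGroupKeys, pvZ]
  | succ n ih =>
    intro bs h
    cases bs with
    | nil => simp [pvGroupKeys, pvZ]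
    | cons b t =>
      have hlen : (t.dropWhile (· == b)).length ≤ n :=
        le_trans (List.length_dropWhile_le _ _) (Nat.succ_le_succ_iff.mp h)
      rw [pvGroupKeys.eq_def]
      simp only [List.map_cons, List.sum_cons, ih _ hlen]
      rw [← pvZ_head_ne b _ (pvDrop_head b t), pvZ_dropWhile]
      cases b <;> simp [pvZ]

-- ===== VERDICT (by name: the statement is the Claim_ definition above) =====
theorem caculate_line_spec : Claim_equal_caculate_line := by
  intro line _
  unfold Spec_caculate_line caculate_line caculate_line_alt
  rw [pvFold_eq line 0 1 (Or.inr rfl), pvGroup_eq _ _ (le_refl _)]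
  norm_num
  rw [show ((1:Int) == 0) = false from rfl]
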